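-- pv_equiv track=rewrite | github.com/KalachevGleb/markup-comparator | compare_reports.py | insert_substrings
-- ===== SOURCE A (Python) =====
-- def insert_substrings(x: str, inserts: dict) -> str:
--     result = []
--     for i in range(len(x) + 1):
--         # Добавляем все вставки перед позицией i, если есть
--         if i in inserts:
--             result.extend(inserts[i])
--         if i < len(x):
--             result.append(x[i])
--
--     return ''.join(result)
-- ===== SOURCE B (Python) =====
-- def insert_substrings(x: str, inserts: dict) -> str:
--     n = len(x)
--     keys = sorted(k for k in inserts if 0 <= k <= n)
--     parts = []
--     prev = 0
--     for k in keys: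
--         parts.append(x[prev:k])
--         parts.extend(inserts[k])
--         prev = k
--     parts.append(x[prev:])
--     return ''.join(parts)
-- ===== Notes on version B (the rewrite author's own statement) =====
-- stated objective: alternative
-- what changed: Instead of scanning every index 0..len(x) and appending characters one by one, B sorts the in-range insert positions and builds the result from whole slices of x between consecutive insert points.
import Mathlib
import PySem

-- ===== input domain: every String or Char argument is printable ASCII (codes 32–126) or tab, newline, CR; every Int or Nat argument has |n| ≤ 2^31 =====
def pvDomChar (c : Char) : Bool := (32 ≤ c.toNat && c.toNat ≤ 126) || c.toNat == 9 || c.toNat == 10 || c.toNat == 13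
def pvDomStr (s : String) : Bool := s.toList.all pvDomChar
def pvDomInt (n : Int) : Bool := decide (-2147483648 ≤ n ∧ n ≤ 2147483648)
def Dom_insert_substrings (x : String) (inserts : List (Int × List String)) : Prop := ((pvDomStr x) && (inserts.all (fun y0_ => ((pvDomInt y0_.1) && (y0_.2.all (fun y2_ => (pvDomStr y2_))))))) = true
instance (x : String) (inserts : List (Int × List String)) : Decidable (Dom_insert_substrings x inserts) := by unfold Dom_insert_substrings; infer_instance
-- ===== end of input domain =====

-- B builds the result from whole slices of x between the sorted in-range insert
-- positions instead of scanning every index and appending character by character.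

-- ===== PORT A =====
def insert_substrings (x : String) (inserts : List (Int × List String)) : String :=
  let d := PySem.Dict.ofList inserts
  let n : Int := PySem.Str.len x
  let result : List String :=
    (PySem.List.pyRange 0 (n + 1) 1).foldl (fun acc i =>
      let acc1 := if d.contains i then acc ++ d.getD i [] else acc
      if i < n then acc1 ++ [String.singleton ((PySem.Str.pyGet? x i).getD ' ')] else acc1) []
  PySem.Str.join "" result

-- ===== PORT B =====
def insert_substrings_alt (x : String) (inserts : List (Int × List String)) : String :=
  let d := PySem.Dict.ofList inserts
  let n : Int := PySem.Str.len x
  let ks := PySem.List.sorted (d.keys.filter (fun k => decide (0 ≤ k) && decide (k ≤ n))) (fun k => k) false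
  let fin := ks.foldl (fun (st : List String × Int) k =>
      (st.1 ++ [PySem.Str.slice x (some st.2) (some k)] ++ d.getD k [], k)) ([], 0)
  PySem.Str.join "" (fin.1 ++ [PySem.Str.slice x (some fin.2) none])

-- ===== PRECONDITION & SPEC =====
def Spec_insert_substrings (x : String) (inserts : List (Int × List String)) (out : String) : Prop := out = insert_substrings_alt x inserts
instance (x : String) (inserts : List (Int × List String)) (out : String) : Decidable (Spec_insert_substrings x inserts out) := by unfold Spec_insert_substrings; infer_instance

-- ===== CLAIM (what is proved, stated in full; the proofs are below) =====
def Claim_equal_insert_substrings : Prop := ∀ (x : String) (inserts : List (Int × List String)), Dom_insert_substrings x inserts → Spec_insert_substrings x inserts (insert_substrings x inserts)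

-- ===== LEMMAS AND PROOFS =====

-- the characters contributed by the inserts stored at position i
def pvIns (d : PySem.Dict Int (List String)) (i : Int) : List Char :=
  (d.getD i []).flatMap String.toList

-- the character of x at position i (empty past the end)
def pvChr (cs : List Char) (i : Int) : List Char :=
  if i < (cs.length : Int) then [(PySem.List.pyGet? cs i).getD ' '] else []

-- what one iteration of A's loop contributes, as characters
def pvG (d : PySem.Dict Int (List String)) (cs : List Char) (i : Int) : List Char :=
  (if d.contains i then pvIns d i else []) ++ pvChr cs i

-- the characters B's loop over the sorted keys produces from cursor p on
def pvLoopB (d : PySem.Dict Int (List String)) (cs : List Char) : List Int → Int → List Char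
  | [], p => PySem.List.slice cs (some p) none
  | k :: r, p => PySem.List.slice cs (some p) (some k) ++ pvIns d k ++ pvLoopB d cs r k

lemma pv_join_nil (ps : List (List Char)) : PySem.Chars.join [] ps = ps.flatten := by
  show List.intercalate [] ps = ps.flatten
  induction ps with
  | nil => simp [List.intercalate]
  | cons a t ih => cases t <;> simp_all [List.intercalate, List.intersperse]

-- A's characters: the flatMap of pvG over range(0, n+1)
lemma pvA_chars (x : String) (inserts : List (Int × List String)) :
    (insert_substrings x inserts).toList =
      (PySem.List.pyRange 0 ((x.toList.length : Int) + 1) 1).flatMap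
        (pvG (PySem.Dict.ofList inserts) x.toList) := by
  unfold insert_substrings
  simp only []
  have hcong : (List.foldl
          (fun acc i =>
            if i < PySem.Str.len x then
              (if (PySem.Dict.ofList inserts).contains i = true then acc ++ (PySem.Dict.ofList inserts).getD i []
                else acc) ++ [String.singleton ((PySem.Str.pyGet? x i).getD ' ')]
            else
              if (PySem.Dict.ofList inserts).contains i = true then acc ++ (PySem.Dict.ofList inserts).getD i []
              else acc)
          [] (PySem.List.pyRange 0 (PySem.Str.len x + 1) 1)) =
        (PySem.List.pyRange 0 (PySem.Str.len x + 1) 1).foldl (fun acc i => acc ++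
          ((if (PySem.Dict.ofList inserts).contains i = true then (PySem.Dict.ofList inserts).getD i [] else []) ++
           (if i < PySem.Str.len x then [String.singleton ((PySem.Str.pyGet? x i).getD ' ')] else []))) [] :=
    PySem.List.foldl_congr_mem _ _ _ _ (by
        intro acc i _
        simp only [PySem.Str.len_eq]
        by_cases h1 : (PySem.Dict.ofList inserts).contains i <;>
          by_cases h2 : i < (x.length : Int) <;> simp [h1, h2])
  rw [hcong, PySem.List.foldl_append_eq_flatMap]
  rw [PySem.Str.toList_join]
  have hjoin : ("" : String).toList = [] := rfl
  rw [hjoin, pv_join_nil, ← List.flatMap_def, List.nil_append, List.flatMap_assoc]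
  have hlen : PySem.Str.len x = (x.toList.length : Int) := by
    simp [PySem.Str.len_eq, String.length_toList]
  rw [hlen]
  refine List.flatMap_congr ?_
  intro i _
  simp only [pvG, pvIns, pvChr]
  by_cases h1 : (PySem.Dict.ofList inserts).contains i <;>
    simp [h1, List.flatMap_append] <;>
      (by_cases hc : i < (x.length : Int) <;> simp [hc])

-- B's loop, with the trailing slice appended, peeled one key at a time
lemma pvB_fold (x : String) (d : PySem.Dict Int (List String)) (ks : List Int) :
    ∀ (acc : List String) (p : Int),
    ((ks.foldl (fun (st : List String × Int) k =>
        (st.1 ++ [PySem.Str.slice x (some st.2) (some k)] ++ d.getD k [], k)) (acc, p)).1 ++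
      [PySem.Str.slice x (some (ks.foldl (fun (st : List String × Int) k =>
        (st.1 ++ [PySem.Str.slice x (some st.2) (some k)] ++ d.getD k [], k)) (acc, p)).2) none]).flatMap String.toList
    = acc.flatMap String.toList ++ pvLoopB d x.toList ks p := by
  induction ks with
  | nil =>
    intro acc p
    simp [pvLoopB, List.flatMap_append, PySem.Str.toList_slice]
  | cons k r ih =>
    intro acc p
    simp only [List.foldl_cons]
    rw [ih]
    simp [pvLoopB, pvIns, List.flatMap_append, PySem.Str.toList_slice]

-- B's characters: pvLoopB over the sorted in-range keys
lemma pvB_chars (x : String) (inserts : List (Int × List String)) :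
    (insert_substrings_alt x inserts).toList =
      pvLoopB (PySem.Dict.ofList inserts) x.toList
        (PySem.List.sorted ((PySem.Dict.ofList inserts).keys.filter
          (fun k => decide (0 ≤ k) && decide (k ≤ (x.toList.length : Int)))) (fun k => k) false) 0 := by
  unfold insert_substrings_alt
  simp only []
  rw [PySem.Str.toList_join]
  have hjoin : ("" : String).toList = [] := rfl
  rw [hjoin, pv_join_nil, ← List.flatMap_def]
  have hlen : PySem.Str.len x = (x.toList.length : Int) := by
    simp [PySem.Str.len_eq, String.length_toList]
  rw [hlen, pvB_fold]
  simp

lemma pvChr_of_lt (cs : List Char) (p : Int) (h0 : 0 ≤ p) (h : p < (cs.length : Int)) :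
    pvChr cs p = [cs[p.toNat]'(by omega)] := by
  have : PySem.List.pyGet? cs p = some (cs[p.toNat]'(by omega)) := by
    rw [PySem.List.pyGet?_of_nonneg _ h0]
    exact List.getElem?_eq_getElem (by omega)
  simp [pvChr, h, this]

-- a key-free stretch of A's scan is one slice of x
lemma pvSeg (d : PySem.Dict Int (List String)) (cs : List Char) (m : Nat) :
    ∀ p : Int, 0 ≤ p → 1 ≤ m → p + m ≤ (cs.length : Int) →
    (∀ i : Int, p < i → i < p + m → d.contains i = false) →
    pvChr cs p ++ (PySem.List.pyRange (p + 1) (p + m) 1).flatMap (pvG d cs) =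
      (cs.drop p.toNat).take m := by
  induction m with
  | zero => omega
  | succ m ih =>
    intro p h0 _ hle hno
    have hplt : p < (cs.length : Int) := by omega
    have hdrop : cs.drop p.toNat = cs[p.toNat]'(by omega) :: cs.drop (p.toNat + 1) :=
      List.drop_eq_getElem_cons (by omega)
    rw [pvChr_of_lt cs p h0 hplt]
    by_cases hm : 1 ≤ m
    · have hcons : PySem.List.pyRange (p + 1) (p + (m + 1 : Nat)) 1 =
          (p + 1) :: PySem.List.pyRange (p + 1 + 1) (p + 1 + m) 1 := by
        have := PySem.List.pyRange_one_cons (a := p + 1) (b := p + (m + 1 : Nat)) (by push_cast; omega)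
        rw [this]; congr 1; (congr 1; push_cast; ring)
      rw [hcons]
      simp only [List.flatMap_cons]
      have hg : pvG d cs (p + 1) = pvChr cs (p + 1) := by
        have := hno (p + 1) (by omega) (by push_cast; omega)
        simp [pvG, this]
      rw [hg]
      rw [ih (p + 1) (by omega) hm (by push_cast at hle ⊢; omega)
            (by intro i h1 h2; exact hno i (by omega) (by push_cast at h2 ⊢; omega))]
      have ht : (p + 1).toNat = p.toNat + 1 := by omega
      rw [ht, hdrop]
      simp only [List.take_succ_cons, List.cons_append, List.nil_append]
    · have hm0 : m = 0 := by omega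
      subst hm0
      have hnil : PySem.List.pyRange (p + 1) (p + (1 : Nat)) 1 = [] := by
        apply PySem.List.pyRange_one_eq_nil; push_cast; omega
      rw [hnil, hdrop]
      simp only [List.flatMap_nil, List.append_nil, List.take_succ_cons, List.take_zero]

-- main invariant: from cursor p on, A's remaining scan equals B's remaining segments
lemma pvMain (d : PySem.Dict Int (List String)) (cs : List Char) (ks : List Int) :
    ∀ p : Int, 0 ≤ p → p ≤ (cs.length : Int) →
    ks.Pairwise (· < ·) →
    (∀ k ∈ ks, p < k ∧ k ≤ (cs.length : Int)) →
    (∀ i : Int, p < i → i ≤ (cs.length : Int) → (d.contains i = true ↔ i ∈ ks)) →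
    pvChr cs p ++ (PySem.List.pyRange (p + 1) ((cs.length : Int) + 1) 1).flatMap (pvG d cs) =
      pvLoopB d cs ks p := by
  induction ks with
  | nil =>
    intro p h0 hn _ _ hinv
    have hslice : pvLoopB d cs [] p = cs.drop p.toNat := by
      show PySem.List.slice cs (some p) none = cs.drop p.toNat
      exact PySem.List.slice_from cs h0
    rw [hslice]
    by_cases hpn : p < (cs.length : Int)
    · -- split off the final index n (it contributes nothing)
      rw [PySem.List.pyRange_one_succ_right (by omega)]
      rw [List.flatMap_append, List.flatMap_cons, List.flatMap_nil]
      have hgn : pvG d cs (cs.length : Int) = [] := by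
        have hc : d.contains (cs.length : Int) = false := by
          have h1 := hinv (cs.length : Int) (by omega) (by omega)
          simp at h1
          exact h1
        simp [pvG, pvChr, hc]
      rw [hgn]
      simp only [List.append_nil]
      have hseg := pvSeg d cs ((cs.length : Int) - p).toNat p h0 (by omega) (by omega)
        (by intro i hi1 hi2
            have h1 := hinv i (by omega) (by omega)
            simp at h1
            exact h1)
      rw [show p + ((((cs.length : Int) - p).toNat : Int)) = (cs.length : Int) by omega] at hseg
      rw [hseg]
      exact List.take_of_length_le (by simp; omega)
    · have hpn' : p = (cs.length : Int) := by omega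
      have hnil : PySem.List.pyRange (p + 1) ((cs.length : Int) + 1) 1 = [] :=
        PySem.List.pyRange_one_eq_nil (by omega)
      rw [hnil]
      simp [pvChr, hpn', List.drop_length]
  | cons k r ih =>
    intro p h0 hn hpw hmem hinv
    obtain ⟨hpk, hkn⟩ := hmem k (List.mem_cons_self ..)
    have hrlt : ∀ j ∈ r, k < j := (List.pairwise_cons.mp hpw).1
    -- split A's remaining range at the key k
    rw [PySem.List.pyRange_one_append (p + 1) k ((cs.length : Int) + 1) (by omega) (by omega),
        List.flatMap_append]
    -- the stretch before k is one slice
    have hseg := pvSeg d cs (k - p).toNat p h0 (by omega) (by omega)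
      (by intro i hi1 hi2
          have hik : i < k := by omega
          have h1 := hinv i (by omega) (by omega)
          rcases Bool.eq_false_or_eq_true (d.contains i) with ht | hf
          · exfalso
            rcases List.mem_cons.mp (h1.mp ht) with hh | hh
            · omega
            · exact absurd (hrlt i hh) (by omega)
          · exact hf)
    rw [show p + (((k - p).toNat : Int)) = k by omega] at hseg
    -- the range from k starts with k itself
    rw [PySem.List.pyRange_one_cons (a := k) (b := (cs.length : Int) + 1) (by omega), List.flatMap_cons]
    have hck : d.contains k = true := (hinv k hpk (by omega)).mpr (List.mem_cons_self ..)
    have hgk : pvG d cs k = pvIns d k ++ pvChr cs k := by simp [pvG, hck]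
    rw [hgk]
    have hih := ih k (by omega) hkn (List.pairwise_cons.mp hpw).2
      (fun j hj => ⟨hrlt j hj, (hmem j (List.mem_cons_of_mem _ hj)).2⟩)
      (by intro i hi1 hi2
          rw [hinv i (by omega) hi2]
          constructor
          · intro h
            rcases List.mem_cons.mp h with h | h
            · omega
            · exact h
          · exact List.mem_cons_of_mem _)
    calc pvChr cs p ++ (List.flatMap (pvG d cs) (PySem.List.pyRange (p + 1) k 1) ++
            ((pvIns d k ++ pvChr cs k) ++ List.flatMap (pvG d cs) (PySem.List.pyRange (k + 1) ((cs.length : Int) + 1) 1)))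
        = (pvChr cs p ++ List.flatMap (pvG d cs) (PySem.List.pyRange (p + 1) k 1)) ++
            (pvIns d k ++ (pvChr cs k ++ List.flatMap (pvG d cs) (PySem.List.pyRange (k + 1) ((cs.length : Int) + 1) 1))) := by
          simp [List.append_assoc]
      _ = (cs.drop p.toNat).take (k - p).toNat ++ (pvIns d k ++ pvLoopB d cs r k) := by rw [hseg, hih]
      _ = pvLoopB d cs (k :: r) p := by
          show _ = PySem.List.slice cs (some p) (some k) ++ pvIns d k ++ pvLoopB d cs r k
          rw [PySem.List.slice_toNat cs h0 (by omega)]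
          simp [List.append_assoc]
          congr 2
          omega

-- the whole scan of A equals the whole segment construction of B
lemma pv_final (d : PySem.Dict Int (List String)) (cs : List Char)
    (hnd : d.keys.Nodup) :
    (PySem.List.pyRange 0 ((cs.length : Int) + 1) 1).flatMap (pvG d cs) =
      pvLoopB d cs
        (PySem.List.sorted (d.keys.filter
          (fun k => decide (0 ≤ k) && decide (k ≤ (cs.length : Int)))) (fun k => k) false) 0 := by
  set ks := PySem.List.sorted (d.keys.filter
      (fun k => decide (0 ≤ k) && decide (k ≤ (cs.length : Int)))) (fun k => k) false with hks
  have hperm : ks.Perm (d.keys.filter (fun k => decide (0 ≤ k) && decide (k ≤ (cs.length : Int)))) :=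
    PySem.List.sorted_perm _ _ _
  have hmemks : ∀ k : Int, k ∈ ks ↔ (0 ≤ k ∧ k ≤ (cs.length : Int) ∧ d.contains k = true) := by
    intro k
    rw [hperm.mem_iff, List.mem_filter]
    constructor
    · rintro ⟨h1, h2⟩
      simp at h2
      exact ⟨h2.1, h2.2, (PySem.Dict.contains_iff_mem_keys d k).mpr h1⟩
    · rintro ⟨h1, h2, h3⟩
      exact ⟨(PySem.Dict.contains_iff_mem_keys d k).mp h3, by simp [h1, h2]⟩
  have hnodup : ks.Nodup := hperm.nodup_iff.mpr (hnd.filter _)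
  have hsorted : ks.Pairwise (· < ·) := by
    have h1 : ks.Pairwise (· ≤ ·) := by
      have := PySem.List.sorted_pairwise (xs := d.keys.filter
        (fun k => decide (0 ≤ k) && decide (k ≤ (cs.length : Int)))) (key := fun k => k)
      exact this
    exact (h1.and hnodup).imp (fun h => lt_of_le_of_ne h.1 h.2)
  -- peel off i = 0
  rw [PySem.List.pyRange_one_cons (a := 0) (b := (cs.length : Int) + 1) (by omega), List.flatMap_cons]
  by_cases h0 : (0 : Int) ∈ ks
  · -- ks starts with the key 0
    obtain ⟨h, t, hht⟩ := List.exists_cons_of_ne_nil (List.ne_nil_of_mem h0)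
    have hh0 : h = 0 := by
      rcases List.mem_cons.mp (hht ▸ h0) with hh | hh
      · omega
      · have := (List.pairwise_cons.mp (hht ▸ hsorted)).1 0 hh
        have hx := (hmemks h).mp (hht ▸ List.mem_cons_self ..)
        omega
    subst hh0
    have hc0 : d.contains 0 = true := ((hmemks 0).mp h0).2.2
    have hmain := pvMain d cs t 0 (le_refl _) (by omega)
      (List.pairwise_cons.mp (hht ▸ hsorted)).2
      (fun j hj => ⟨(List.pairwise_cons.mp (hht ▸ hsorted)).1 j hj,
        ((hmemks j).mp (hht ▸ List.mem_cons_of_mem _ hj)).2.1⟩)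
      (by intro i hi1 hi2
          constructor
          · intro hc
            have hmm := (hmemks i).mpr ⟨by omega, hi2, hc⟩
            rcases List.mem_cons.mp (hht ▸ hmm) with hh | hh
            · omega
            · exact hh
          · intro hi
            exact ((hmemks i).mp (hht ▸ List.mem_cons_of_mem _ hi)).2.2)
    rw [hht]
    calc pvG d cs 0 ++ List.flatMap (pvG d cs) (PySem.List.pyRange (0 + 1) ((cs.length : Int) + 1) 1)
        = pvIns d 0 ++ (pvChr cs 0 ++ List.flatMap (pvG d cs) (PySem.List.pyRange (0 + 1) ((cs.length : Int) + 1) 1)) := by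
          simp [pvG, hc0, List.append_assoc]
      _ = pvIns d 0 ++ pvLoopB d cs t 0 := by rw [hmain]
      _ = pvLoopB d cs (0 :: t) 0 := by
          show _ = PySem.List.slice cs (some 0) (some 0) ++ pvIns d 0 ++ pvLoopB d cs t 0
          rw [PySem.List.slice_toNat cs (by omega) (by omega)]
          simp
  · have hc0 : d.contains 0 = false := by
      rcases Bool.eq_false_or_eq_true (d.contains 0) with ht | hf
      · exact absurd ((hmemks 0).mpr ⟨le_refl _, by omega, ht⟩) h0
      · exact hf
    have hmain := pvMain d cs ks 0 (le_refl _) (by omega) hsorted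
      (fun j hj => by
        have := (hmemks j).mp hj
        have hj0 : j ≠ 0 := fun hh => h0 (hh ▸ hj)
        exact ⟨by omega, this.2.1⟩)
      (by intro i hi1 hi2
          rw [hmemks i]
          constructor
          · intro hc; exact ⟨by omega, hi2, hc⟩
          · intro hc; exact hc.2.2)
    rw [← hmain]
    simp [pvG, hc0]

-- ===== VERDICT (by name: the statement is the Claim_ definition above) =====
theorem insert_substrings_spec : Claim_equal_insert_substrings := by
  intro x inserts _
  unfold Spec_insert_substrings
  apply String.toList_inj.mp
  rw [pvA_chars, pvB_chars]
  exact pv_final (PySem.Dict.ofList inserts) x.toList (PySem.Dict.nodup_keys_ofList inserts)
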